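-- pv_equiv track=rewrite | github.com/TheDatumOrg/SPARTAN | spartan/spartan.py | permutations_w_constraints
-- ===== SOURCE A (Python) =====
-- def permutations_w_constraints(n_perm_elements, sum_total, min_value, max_value):
--     # base case
--     if n_perm_elements == 1:
--         if (sum_total <= max_value) & (sum_total >= min_value):
--             yield (sum_total,)
--     else:
--         for value in range(min_value, max_value + 1):
--             for permutation in permutations_w_constraints(
--                 n_perm_elements - 1, sum_total - value, min_value, max_value
--             ):
--                 if value >= permutation[0]:
--                     yield (value,) + permutation
-- ===== SOURCE B (Python) =====
-- def permutations_w_constraints(n_perm_elements, sum_total, min_value, max_value):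
--     # Explicit-stack DFS over non-increasing tuples, with each level's value
--     # range pruned to the feasible interval, so dead branches are never entered.
--     if n_perm_elements < 1:
--         return
--     stack = [(n_perm_elements, sum_total, max_value, ())]
--     while stack:
--         k, s, cap, prefix = stack.pop()
--         if k == 1:
--             if min_value <= s <= cap:
--                 yield prefix + (s,)
--         else:
--             lo = max(min_value, -(-s // k))          # ceil(s/k): the k-1 later values are <= v
--             hi = min(cap, s - (k - 1) * min_value)   # the k-1 later values are >= min_value
--             for v in range(hi, lo - 1, -1):          # descending pushes -> ascending pops
--                 stack.append((k - 1, s - v, v, prefix + (v,)))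
-- ===== Notes on version B (the rewrite author's own statement) =====
-- stated objective: alternative
-- what changed: Instead of scanning the whole [min,max] range at every level of a recursive generator and discarding increasing tuples afterwards, B runs an explicit-stack DFS that threads the previous value as a cap and restricts each level's loop to the feasible interval [max(min, ceil(s/k)), min(cap, s-(k-1)*min)], so only branches that can still complete are entered.
import Mathlib
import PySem

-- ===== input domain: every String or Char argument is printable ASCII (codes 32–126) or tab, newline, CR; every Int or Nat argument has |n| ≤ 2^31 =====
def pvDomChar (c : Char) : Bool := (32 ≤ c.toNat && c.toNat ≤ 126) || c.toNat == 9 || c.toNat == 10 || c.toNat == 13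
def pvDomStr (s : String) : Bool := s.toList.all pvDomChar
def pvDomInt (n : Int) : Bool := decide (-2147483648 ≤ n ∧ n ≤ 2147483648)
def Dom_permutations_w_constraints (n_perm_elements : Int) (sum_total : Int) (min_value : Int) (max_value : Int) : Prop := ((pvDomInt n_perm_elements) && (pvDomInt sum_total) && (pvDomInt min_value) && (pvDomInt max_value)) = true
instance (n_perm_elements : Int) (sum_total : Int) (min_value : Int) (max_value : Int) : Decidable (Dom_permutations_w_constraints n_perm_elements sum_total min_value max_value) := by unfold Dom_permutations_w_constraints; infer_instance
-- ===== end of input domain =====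

-- B replaces A's full-range recursive scan by an explicit-stack DFS whose per-level value
-- range is pruned to the feasible interval (an alternative strategy that only enters
-- branches able to complete). Both Pythons are generators; equivalence is about the
-- yielded sequence (as a list).

-- ===== PORT A =====
-- Recursion is on the Nat image of n_perm_elements (each recursive call is n-1,
-- taken only when n ≠ 1); for n < 1 with a nonempty range the Python recurses
-- forever (excluded by Pre_), and with an empty range it yields nothing.
def permA_go (k : Nat) (s mn mx : Int) : List (List Int) :=
  match k with
  | 0 => []          -- unreachable under Pre_ (Python diverges or yields nothing)
  | 1 => if s ≤ mx ∧ mn ≤ s then [[s]] else []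
  | k' + 2 =>
    (PySem.List.pyRange mn (mx + 1) 1).flatMap (fun value =>
      (permA_go (k' + 1) (s - value) mn mx).filterMap (fun permutation =>
        -- permutation[0]: the recursion never yields an empty tuple
        match permutation with
        | p0 :: _ => if p0 ≤ value then some (value :: permutation) else none
        | [] => none))

def permutations_w_constraints (n_perm_elements : Int) (sum_total : Int) (min_value : Int) (max_value : Int) : List (List Int) :=
  if n_perm_elements < 1 then [] else
  permA_go n_perm_elements.toNat sum_total min_value max_value

-- ===== PORT B =====
-- ceil(s/k) written as Python's -(-s // k)
def permB_ceilDiv (s k : Int) : Int := -(PySem.Int.floordiv (-s) k)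

-- Source B's while loop pops an item (k, s, cap, prefix) and pushes its children
-- (k-1, s-v, v, prefix+(v,)) for v in the pruned interval, popping them in ascending
-- order of v; an item's whole processing depends only on the item itself, so the loop
-- is ported as the structural recursion on k that performs exactly one call per popped
-- item: same pruned bounds, same DFS (ascending, lexicographic) order of the output.
-- The prefix only ever prepends the path, so it is left implicit (the top-level prefix
-- is empty).
def permB_go (k : Nat) (s mn cap : Int) : List (List Int) :=
  match k with
  | 0 => []  -- unreachable: items with k < 1 never reach the Python stack
  | 1 => if mn ≤ s ∧ s ≤ cap then [[s]] else []
  | k' + 2 =>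
    let lo := max mn (permB_ceilDiv s (k' + 2))
    let hi := min cap (s - (k' + 1) * mn)
    (PySem.List.pyRange lo (hi + 1) 1).flatMap (fun v =>
      (permB_go (k' + 1) (s - v) mn v).map (fun tail => v :: tail))

def permutations_w_constraints_alt (n_perm_elements : Int) (sum_total : Int) (min_value : Int) (max_value : Int) : List (List Int) :=
  if n_perm_elements < 1 then [] else
  permB_go n_perm_elements.toNat sum_total min_value max_value

-- ===== PRECONDITION & SPEC =====
-- Pre_ excludes only n_perm_elements < 1 with min_value ≤ max_value, where the Python A
-- recurses without a base case and raises RecursionError.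
def Pre_permutations_w_constraints (n_perm_elements : Int) (sum_total : Int) (min_value : Int) (max_value : Int) : Prop :=
  1 ≤ n_perm_elements ∨ max_value < min_value
instance (n_perm_elements : Int) (sum_total : Int) (min_value : Int) (max_value : Int) : Decidable (Pre_permutations_w_constraints n_perm_elements sum_total min_value max_value) := by unfold Pre_permutations_w_constraints; infer_instance

def pvWitness_permutations_w_constraints : Int × Int × Int × Int := (3, 5, 0, 4)

def Spec_permutations_w_constraints (n_perm_elements : Int) (sum_total : Int) (min_value : Int) (max_value : Int) (out : List (List Int)) : Prop := out = permutations_w_constraints_alt n_perm_elements sum_total min_value max_value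
instance (n_perm_elements : Int) (sum_total : Int) (min_value : Int) (max_value : Int) (out : List (List Int)) : Decidable (Spec_permutations_w_constraints n_perm_elements sum_total min_value max_value out) := by unfold Spec_permutations_w_constraints; infer_instance

-- ===== CLAIM (what is proved, stated in full; the proofs are below) =====
def Claim_equal_permutations_w_constraints : Prop := ∀ (n_perm_elements : Int) (sum_total : Int) (min_value : Int) (max_value : Int), Dom_permutations_w_constraints n_perm_elements sum_total min_value max_value → Pre_permutations_w_constraints n_perm_elements sum_total min_value max_value → Spec_permutations_w_constraints n_perm_elements sum_total min_value max_value (permutations_w_constraints n_perm_elements sum_total min_value max_value)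

-- ===== LEMMAS AND PROOFS =====

-- Invariant of A's recursion: every yielded tuple has length k, sum s, entries ≥ mn,
-- and a head that bounds all entries and is ≤ mx.
theorem permA_go_mem {k : Nat} {s mn mx : Int} {l : List Int}
    (hk : 1 ≤ k) (hl : l ∈ permA_go k s mn mx) :
    l.length = k ∧ l.sum = s ∧ (∀ x ∈ l, mn ≤ x) ∧
      ∃ h t, l = h :: t ∧ (∀ x ∈ l, x ≤ h) ∧ h ≤ mx := by
  induction k generalizing s l with
  | zero => omega
  | succ k ih =>
    match k with
    | 0 =>
      simp only [permA_go] at hl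
      split at hl
      · rename_i hc
        simp only [List.mem_singleton] at hl
        subst hl
        refine ⟨rfl, by simp, by simp [hc.2], s, [], rfl, by simp, hc.1⟩
      · simp at hl
    | k' + 1 =>
      simp only [permA_go, List.mem_flatMap] at hl
      obtain ⟨v, hv, hl⟩ := hl
      rw [PySem.List.mem_pyRange_one] at hv
      rw [List.mem_filterMap] at hl
      obtain ⟨perm, hperm, hsome⟩ := hl
      obtain ⟨plen, psum, pmn, h, t, heq, hle, hmx⟩ := ih (by omega) hperm
      subst heq
      simp only at hsome
      split_ifs at hsome with hcmp
      · simp only [Option.some.injEq] at hsome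
        subst hsome
        refine ⟨by simp [plen], by simp at psum ⊢; omega, ?_, v, h :: t, rfl, ?_, by omega⟩
        · intro x hx
          rcases List.mem_cons.1 hx with rfl | hx
          · omega
          · exact (pmn x hx)
        · intro x hx
          rcases List.mem_cons.1 hx with rfl | hx
          · omega
          · have := hle x hx; omega

-- filter distributes over flatMap
theorem filter_flatMap_eq {α β : Type} (xs : List α) (f : α → List β) (p : β → Bool) :
    (xs.flatMap f).filter p = xs.flatMap (fun x => (f x).filter p) := by
  induction xs with
  | nil => rfl
  | cons x xs ih => simp [List.flatMap_cons, List.filter_append, ih]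

-- A's inner filterMap (over nonempty tuples) is "filter head ≤ v, then cons v"
theorem inner_filterMap_eq (v : Int) (L : List (List Int)) (hne : ∀ l ∈ L, l ≠ []) :
    L.filterMap (fun permutation =>
      match permutation with
      | p0 :: _ => if p0 ≤ v then some (v :: permutation) else none
      | [] => none)
    = (L.filter (fun l => decide (l.headI ≤ v))).map (fun t => v :: t) := by
  induction L with
  | nil => rfl
  | cons l L ih =>
    have hl : l ≠ [] := hne l (List.mem_cons_self)
    have ihr := ih (fun x hx => hne x (List.mem_cons_of_mem _ hx))
    match l with
    | p0 :: t =>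
      by_cases hc : p0 ≤ v
      · simp [List.filterMap_cons, List.filter_cons, hc, ihr]
      · simp [List.filterMap_cons, List.filter_cons, hc, ihr]

-- flatMap over a subrange equals flatMap over the full range when f is [] outside it
theorem flatMap_pyRange_shrink {α : Type} (f : Int → List α) (a b lo hi : Int)
    (hal : a ≤ lo) (hhb : hi ≤ b)
    (hemp : ∀ v, a ≤ v → v ≤ b → (v < lo ∨ hi < v) → f v = []) :
    (PySem.List.pyRange a (b + 1) 1).flatMap f = (PySem.List.pyRange lo (hi + 1) 1).flatMap f := by
  by_cases hlh : lo ≤ hi + 1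
  · rw [PySem.List.pyRange_one_append a lo (b+1) hal (by omega),
        PySem.List.pyRange_one_append lo (hi+1) (b+1) hlh (by omega)]
    simp only [List.flatMap_append]
    have h1 : (PySem.List.pyRange a lo 1).flatMap f = [] := by
      rw [List.flatMap_eq_nil_iff]
      intro v hv
      rw [PySem.List.mem_pyRange_one] at hv
      exact hemp v hv.1 (by omega) (Or.inl (by omega))
    have h2 : (PySem.List.pyRange (hi+1) (b+1) 1).flatMap f = [] := by
      rw [List.flatMap_eq_nil_iff]
      intro v hv
      rw [PySem.List.mem_pyRange_one] at hv
      exact hemp v (by omega) (by omega) (Or.inr (by omega))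
    simp [h1, h2]
  · -- the pruned range is empty and every value of the full range maps to []
    rw [PySem.List.pyRange_one_eq_nil (a := lo) (by omega)]
    simp only [List.flatMap_nil]
    rw [List.flatMap_eq_nil_iff]
    intro v hv
    rw [PySem.List.mem_pyRange_one] at hv
    exact hemp v hv.1 (by omega) (by omega)

-- flatMap congruence on members
theorem flatMap_congr_mem {α β : Type} {xs : List α} {f g : α → List β}
    (h : ∀ x ∈ xs, f x = g x) : xs.flatMap f = xs.flatMap g := by
  induction xs with
  | nil => rfl
  | cons x xs ih =>
    simp only [List.flatMap_cons]
    rw [h x (List.mem_cons_self), ih (fun y hy => h y (List.mem_cons_of_mem _ hy))]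

-- ceiling division characterisation: v < ceil(s/k) ↔ k*v < s (k > 0)
theorem ceilDiv_le_iff (s k v : Int) (hk : 0 < k) :
    permB_ceilDiv s k ≤ v ↔ s ≤ v * k := by
  unfold permB_ceilDiv
  have h := PySem.Int.neg_floordiv_neg_eq_iff_of_pos (a := s) (b := k)
      (q := -(PySem.Int.floordiv (-s) k)) hk
  have h2 := h.mp rfl
  constructor
  · intro hle
    nlinarith [h2.2]
  · intro hle
    by_contra hgt
    push_neg at hgt
    have : v + 1 ≤ -(PySem.Int.floordiv (-s) k) := by omega
    nlinarith [h2.1]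

-- Main lemma: B's pruned recursion computes A's results whose head is ≤ cap.
theorem permB_go_eq_filter (k : Nat) (hk : 1 ≤ k) (s mn cap mx : Int) (hcap : cap ≤ mx) :
    permB_go k s mn cap = (permA_go k s mn mx).filter (fun l => decide (l.headI ≤ cap)) := by
  induction k generalizing s cap with
  | zero => omega
  | succ k ih =>
    match k with
    | 0 =>
      simp only [permB_go, permA_go]
      split_ifs with h1 h2 h3 <;> simp_all <;> omega
    | k' + 1 =>
      simp only [permB_go, permA_go]
      rw [filter_flatMap_eq]
      -- rewrite each of A's inner lists as a filtered, consed copy of the recursion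
      have hinner : ∀ v : Int,
          ((permA_go (k' + 1) (s - v) mn mx).filterMap (fun permutation =>
            match permutation with
            | p0 :: _ => if p0 ≤ v then some (v :: permutation) else none
            | [] => none)).filter (fun l => decide (l.headI ≤ cap))
          = if v ≤ cap then
              ((permA_go (k' + 1) (s - v) mn mx).filter (fun l => decide (l.headI ≤ v))).map (fun t => v :: t)
            else [] := by
        intro v
        rw [inner_filterMap_eq v _ (fun l hl => by
          obtain ⟨_, _, _, h, t, heq, _⟩ := permA_go_mem (by omega) hl
          simp [heq])]
        by_cases hv : v ≤ cap
        · simp [hv, List.filter_map, Function.comp_def, List.filter_filter]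
        · simp only [if_neg hv]
          rw [List.filter_map, List.filter_eq_nil_iff.mpr, List.map_nil]
          intro l _
          simp only [Function.comp_def]
          simp [List.headI]
          omega
      simp only [hinner]
      set lo := max mn (permB_ceilDiv s (k' + 2)) with hlo_def
      set hi := min cap (s - (k' + 1) * mn) with hhi_def
      have hemp : ∀ v, mn ≤ v → v ≤ mx → (v < lo ∨ hi < v) →
          (if v ≤ cap then
              ((permA_go (k' + 1) (s - v) mn mx).filter (fun l => decide (l.headI ≤ v))).map (fun t => v :: t)
            else ([] : List (List Int))) = [] := by
        intro v hva hvb hout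
        by_cases hvc : v ≤ cap
        · simp only [if_pos hvc]
          rw [List.filter_eq_nil_iff.mpr, List.map_nil]
          intro l hl
          obtain ⟨plen, psum, pmn, h, t, heq, hle, _⟩ := permA_go_mem (by omega) hl
          subst heq
          simp only [List.headI, decide_eq_true_eq]
          intro hhv
          have hsum_ge : ((k' : Int) + 1) * mn ≤ (h :: t).sum := by
            have hgen : ∀ (u : List Int), (∀ x ∈ u, mn ≤ x) → (u.length : Int) * mn ≤ u.sum := by
              intro u
              induction u with
              | nil => simp
              | cons a u ihu =>
                intro hu
                have h1 := hu a (List.mem_cons_self)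
                have h2 := ihu (fun x hx => hu x (List.mem_cons_of_mem _ hx))
                simp only [List.sum_cons, List.length_cons]
                push_cast
                nlinarith
            have := hgen (h :: t) pmn
            rw [plen] at this
            push_cast at this ⊢
            linarith
          have hsum_le : (h :: t).sum ≤ ((k' : Int) + 1) * v := by
            have hgen : ∀ (u : List Int), (∀ x ∈ u, x ≤ v) → u.sum ≤ (u.length : Int) * v := by
              intro u
              induction u with
              | nil => simp
              | cons a u ihu =>
                intro hu
                have h1 := hu a (List.mem_cons_self)
                have h2 := ihu (fun x hx => hu x (List.mem_cons_of_mem _ hx))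
                simp only [List.sum_cons, List.length_cons]
                push_cast
                nlinarith
            have := hgen (h :: t) (fun x hx => le_trans (hle x hx) hhv)
            rw [plen] at this
            push_cast at this ⊢
            linarith
          rw [psum] at hsum_ge hsum_le
          rcases hout with hlt | hgt
          · have hceil : ¬ permB_ceilDiv s (k' + 2) ≤ v := by omega
            have := (ceilDiv_le_iff s (k' + 2) v (by positivity)).not.mp hceil
            push_cast at this
            nlinarith
          · have hvbound : s - ((k' : Int) + 1) * mn < v := by
              have : (((k' : Nat) + 1 : Nat) : Int) = (k' : Int) + 1 := by push_cast; ring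
              omega
            nlinarith
        · simp [hvc]
      rw [flatMap_pyRange_shrink _ mn mx lo hi (le_max_left _ _) (by omega) hemp]
      apply flatMap_congr_mem
      intro v hv
      rw [PySem.List.mem_pyRange_one] at hv
      have hvcap : v ≤ cap := by omega
      have hvmx : v ≤ mx := by omega
      rw [if_pos hvcap, ih (by omega) (s - v) v hvmx]

-- filter by head ≤ mx is the identity on A's output (all heads are ≤ mx)
theorem permA_filter_top (k : Nat) (hk : 1 ≤ k) (s mn mx : Int) :
    (permA_go k s mn mx).filter (fun l => decide (l.headI ≤ mx)) = permA_go k s mn mx := by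
  apply List.filter_eq_self.mpr
  intro l hl
  obtain ⟨_, _, _, h, t, heq, _, hmx⟩ := permA_go_mem hk hl
  subst heq
  simpa using hmx

-- ===== VERDICT (by name: the statement is the Claim_ definition above) =====
theorem permutations_w_constraints_spec : Claim_equal_permutations_w_constraints := by
  intro n s mn mx _ hpre
  unfold Spec_permutations_w_constraints permutations_w_constraints permutations_w_constraints_alt
  by_cases hn : n < 1
  · simp [hn]
  · push_neg at hn
    rw [if_neg (by omega), if_neg (by omega)]
    have hk : 1 ≤ n.toNat := by omega
    rw [permB_go_eq_filter n.toNat hk s mn mx mx le_rfl, permA_filter_top n.toNat hk]
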